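-- pv_equiv track=rewrite | github.com/Yldrax/AoC24 | 01.py | list_similarity
-- ===== SOURCE A (Python) =====
-- def list_similarity(list1: list[int], list2: list[int]) -> int:
--     num_dict = {}
--     similarity = 0
--
--     for number in list2:
--         if number in num_dict:
--             num_dict[number] += 1
--         else:
--             num_dict[number] = 1
--
--     for number in list1:
--         if number in num_dict:
--             similarity += number * num_dict[number]
--
--     return similarity
-- ===== SOURCE B (Python) =====
-- def list_similarity(list1: list[int], list2: list[int]) -> int:
--     count1 = {}
--     for n in list1:
--         count1[n] = count1.get(n, 0) + 1
--     count2 = {}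
--     for n in list2:
--         count2[n] = count2.get(n, 0) + 1
--     total = 0
--     for v, c in count1.items():
--         total += v * c * count2.get(v, 0)
--     return total
-- ===== Notes on version B (the rewrite author's own statement) =====
-- stated objective: alternative
-- what changed: A scans list1 element by element against a count dict of list2; B builds frequency tables for BOTH lists and sums v * count1[v] * count2[v] over the distinct values of list1, so duplicates in list1 are handled once via their multiplicity.
import Mathlib
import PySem

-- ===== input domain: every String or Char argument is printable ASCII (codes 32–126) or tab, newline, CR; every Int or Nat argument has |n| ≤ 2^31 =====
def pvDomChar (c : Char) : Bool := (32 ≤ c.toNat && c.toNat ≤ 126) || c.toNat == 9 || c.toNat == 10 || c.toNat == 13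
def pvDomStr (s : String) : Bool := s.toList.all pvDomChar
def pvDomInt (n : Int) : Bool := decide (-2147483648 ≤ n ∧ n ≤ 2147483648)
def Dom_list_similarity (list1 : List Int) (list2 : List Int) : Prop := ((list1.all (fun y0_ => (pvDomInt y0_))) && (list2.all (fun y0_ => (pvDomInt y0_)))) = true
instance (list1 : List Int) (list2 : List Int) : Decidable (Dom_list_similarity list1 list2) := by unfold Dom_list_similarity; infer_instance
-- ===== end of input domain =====

-- B replaces A's per-element scan of list1 by a sum over the distinct values of list1,
-- weighted by both multiplicities (two frequency tables); objective: alternative decomposition.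

-- ===== PORT A =====
def list_similarity (list1 : List Int) (list2 : List Int) : Int :=
  let numDict : PySem.Dict Int Int :=
    list2.foldl (fun d number =>
      if d.contains number then d.insert number (d.getD number 0 + 1)
      else d.insert number 1) PySem.Dict.empty
  list1.foldl (fun similarity number =>
    if numDict.contains number then similarity + number * numDict.getD number 0
    else similarity) 0

-- ===== PORT B =====
def list_similarity_alt (list1 : List Int) (list2 : List Int) : Int :=
  let count1 : PySem.Dict Int Int :=
    list1.foldl (fun d n => d.insert n (d.getD n 0 + 1)) PySem.Dict.empty
  let count2 : PySem.Dict Int Int :=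
    list2.foldl (fun d n => d.insert n (d.getD n 0 + 1)) PySem.Dict.empty
  count1.items.foldl (fun total p => total + p.1 * p.2 * count2.getD p.1 0) 0

-- ===== PRECONDITION & SPEC =====
def Spec_list_similarity (list1 : List Int) (list2 : List Int) (out : Int) : Prop := out = list_similarity_alt list1 list2
instance (list1 : List Int) (list2 : List Int) (out : Int) : Decidable (Spec_list_similarity list1 list2 out) := by unfold Spec_list_similarity; infer_instance

-- ===== CLAIM (what is proved, stated in full; the proofs are below) =====
def Claim_equal_list_similarity : Prop := ∀ (list1 : List Int) (list2 : List Int), Dom_list_similarity list1 list2 → Spec_list_similarity list1 list2 (list_similarity list1 list2)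

-- ===== LEMMAS AND PROOFS =====

-- A's branchy counting loop is the uniform counter loop (in the missing-key branch getD is 0).
theorem countLoop_eq_counter (l : List Int) :
    l.foldl (fun d number =>
      if d.contains number then d.insert number (d.getD number 0 + 1)
      else d.insert number 1) PySem.Dict.empty = PySem.Dict.counter l := by
  rw [← PySem.Dict.foldl_insert_getD_add_one_eq_counter]
  congr 1
  funext d n
  by_cases h : d.contains n = true
  · simp [h]
  · simp only [Bool.not_eq_true] at h
    simp [h, PySem.Dict.getD_of_not_contains d 0 h]

-- Both programs compute Σ_{x ∈ list1} x · count(x, list2), A directly, B over distinct values.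
theorem list_similarity_eq_sum (l1 l2 : List Int) :
    list_similarity l1 l2 = (l1.map (fun n => n * (l2.count n : Int))).sum := by
  simp only [list_similarity, countLoop_eq_counter]
  have hstep : (fun (s n : Int) =>
      if (PySem.Dict.counter l2).contains n then s + n * (PySem.Dict.counter l2).getD n 0
      else s) = (fun s n => s + n * (l2.count n : Int)) := by
    funext s n
    rw [PySem.Dict.contains_counter, PySem.Dict.getD_counter]
    by_cases h : n ∈ l2
    · simp [h]
    · simp [h, List.count_eq_zero.mpr h]
  rw [hstep, PySem.List.foldl_add, zero_add]

theorem list_similarity_alt_eq_sum (l1 l2 : List Int) :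
    list_similarity_alt l1 l2 =
      ((PySem.Set.ofList l1).map
        (fun k => k * (l1.count k : Int) * (l2.count k : Int))).sum := by
  unfold list_similarity_alt
  rw [PySem.Dict.foldl_insert_getD_add_one_eq_counter,
      PySem.Dict.foldl_insert_getD_add_one_eq_counter,
      PySem.List.foldl_add, zero_add, PySem.Dict.items_counter, List.map_map]
  congr 1
  apply List.map_congr_left
  intro k _
  simp [PySem.Dict.getD_counter]

theorem toFinset_ofList (l : List Int) : (PySem.Set.ofList l).toFinset = l.toFinset := by
  ext x
  simp [PySem.Set.mem_ofList]

theorem list_similarity_spec : Claim_equal_list_similarity := by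
  intro l1 l2 _
  unfold Spec_list_similarity
  rw [list_similarity_eq_sum, list_similarity_alt_eq_sum,
      ← List.sum_toFinset _ (PySem.Set.nodup_ofList l1), toFinset_ofList,
      Finset.sum_list_map_count]
  apply Finset.sum_congr rfl
  intro m _
  push_cast [nsmul_eq_mul]
  ring
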